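-- pv_equiv track=rewrite | github.com/timytimytimy/ai_coach | server/analysis/rules.py | _drill_labels_zh
-- ===== SOURCE A (Python) =====
-- def _drill_labels_zh(drills: list[str] | None) -> list[str]:
--     if not isinstance(drills, list):
--         return []
--     mapping = {
--         "pause squat": "暂停深蹲",
--         "tempo squat": "节奏深蹲",
--         "pin squat": "架上蹲",
--         "squat doubles": "双次组深蹲",
--         "box squat": "箱式深蹲",
--         "front squat": "前蹲",
--         "paused bench": "暂停卧推",
--         "spoto press": "Spoto Press",
--         "tempo deadlift": "节奏硬拉",
--         "paused deadlift": "暂停硬拉",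
--         "setup tension drill": "预拉张力练习",
--         "banded deadlift": "弹力带硬拉",
--         "quad-dominant accessory": "股四主导辅助",
--         "straight-arm lat activation": "直臂背阔激活",
--         "overload lockout work": "锁定强化练习",
--         "high bar squat": "高杠深蹲",
--         "bulgarian split squat": "保加利亚分腿蹲",
--         "sumo wedge drill": "相扑楔入练习",
--         "paused sumo deadlift": "暂停相扑硬拉",
--         "tempo variation": "节奏变化练习",
--     }
--     out: list[str] = []
--     for drill in drills:
--         if not isinstance(drill, str):
--             continue
--         label = mapping.get(drill, drill)
--         if label not in out:
--             out.append(label)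
--         if len(out) >= 2:
--             break
--     return out
-- ===== SOURCE B (Python) =====
-- _MAPPING = {
--     "pause squat": "暂停深蹲",
--     "tempo squat": "节奏深蹲",
--     "pin squat": "架上蹲",
--     "squat doubles": "双次组深蹲",
--     "box squat": "箱式深蹲",
--     "front squat": "前蹲",
--     "paused bench": "暂停卧推",
--     "spoto press": "Spoto Press",
--     "tempo deadlift": "节奏硬拉",
--     "paused deadlift": "暂停硬拉",
--     "setup tension drill": "预拉张力练习",
--     "banded deadlift": "弹力带硬拉",
--     "quad-dominant accessory": "股四主导辅助",
--     "straight-arm lat activation": "直臂背阔激活",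
--     "overload lockout work": "锁定强化练习",
--     "high bar squat": "高杠深蹲",
--     "bulgarian split squat": "保加利亚分腿蹲",
--     "sumo wedge drill": "相扑楔入练习",
--     "paused sumo deadlift": "暂停相扑硬拉",
--     "tempo variation": "节奏变化练习",
-- }
--
--
-- def _drill_labels_zh(drills):
--     # The answer has at most two elements, so instead of accumulating and
--     # deduplicating, search: the first label, then the first later label
--     # that differs from it, sharing one iterator between the two searches.
--     if not isinstance(drills, list):
--         return []
--     labels = (_MAPPING.get(d, d) for d in drills if isinstance(d, str))
--     for first in labels:
--         for second in labels:
--             if second != first: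
--                 return [first, second]
--         return [first]
--     return []
-- ===== Notes on version B (the rewrite author's own statement) =====
-- stated objective: alternative
-- what changed: Instead of accumulating into a list with a membership test, dedup and a cap, B exploits that the result has at most two elements: it searches the mapped stream for the first label and then, continuing the same iterator, for the first later label that differs from it, returning immediately.
import Mathlib
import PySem

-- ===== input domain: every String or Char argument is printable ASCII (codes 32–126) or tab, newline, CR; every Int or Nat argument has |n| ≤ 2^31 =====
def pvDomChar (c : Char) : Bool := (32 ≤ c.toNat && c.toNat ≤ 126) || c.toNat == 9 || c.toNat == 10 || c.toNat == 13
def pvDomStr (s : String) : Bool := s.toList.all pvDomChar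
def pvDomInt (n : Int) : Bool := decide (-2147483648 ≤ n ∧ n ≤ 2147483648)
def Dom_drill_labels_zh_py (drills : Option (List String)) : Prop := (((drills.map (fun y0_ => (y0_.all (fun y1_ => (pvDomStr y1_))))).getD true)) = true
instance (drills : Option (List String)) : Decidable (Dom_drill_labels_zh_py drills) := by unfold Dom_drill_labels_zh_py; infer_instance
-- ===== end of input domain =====

-- B replaces A's accumulate/membership-test/capped loop by a two-phase search (first label, then first later differing label), since the result has at most two elements; same cost, different algorithm.

-- the drill → Chinese-label dict, used verbatim by both Pythons
def pvMapping : PySem.Dict String String := PySem.Dict.ofList [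
  ("pause squat", "暂停深蹲"),
  ("tempo squat", "节奏深蹲"),
  ("pin squat", "架上蹲"),
  ("squat doubles", "双次组深蹲"),
  ("box squat", "箱式深蹲"),
  ("front squat", "前蹲"),
  ("paused bench", "暂停卧推"),
  ("spoto press", "Spoto Press"),
  ("tempo deadlift", "节奏硬拉"),
  ("paused deadlift", "暂停硬拉"),
  ("setup tension drill", "预拉张力练习"),
  ("banded deadlift", "弹力带硬拉"),
  ("quad-dominant accessory", "股四主导辅助"),
  ("straight-arm lat activation", "直臂背阔激活"),
  ("overload lockout work", "锁定强化练习"),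
  ("high bar squat", "高杠深蹲"),
  ("bulgarian split squat", "保加利亚分腿蹲"),
  ("sumo wedge drill", "相扑楔入练习"),
  ("paused sumo deadlift", "暂停相扑硬拉"),
  ("tempo variation", "节奏变化练习")]

-- ===== PORT A =====
-- A's loop: append label if not already in out, break once len(out) >= 2
def pvLoopA : List String → List String → List String
  | [], out => out
  | d :: rest, out =>
    let label := pvMapping.getD d d
    let out' := if label ∈ out then out else out ++ [label]
    if 2 ≤ out'.length then out' else pvLoopA rest out'

def drill_labels_zh_py (drills : Option (List String)) : List String :=
  match drills with
  | none => []                 -- "not isinstance(drills, list)"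
  | some ds => pvLoopA ds []

-- ===== PORT B =====
-- inner search: first mapped label differing from `first`, continuing the shared iterator
def pvFindSecond (first : String) : List String → List String
  | [] => [first]
  | d :: rest =>
    let second := pvMapping.getD d d
    if second ≠ first then [first, second] else pvFindSecond first rest

def drill_labels_zh_py_alt (drills : Option (List String)) : List String :=
  match drills with
  | none => []
  | some [] => []
  | some (d :: rest) => pvFindSecond (pvMapping.getD d d) rest

-- ===== PRECONDITION & SPEC =====
def Spec_drill_labels_zh_py (drills : Option (List String)) (out : List String) : Prop := out = drill_labels_zh_py_alt drills
instance (drills : Option (List String)) (out : List String) : Decidable (Spec_drill_labels_zh_py drills out) := by unfold Spec_drill_labels_zh_py; infer_instance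

-- ===== CLAIM (what is proved, stated in full; the proofs are below) =====
def Claim_equal_drill_labels_zh_py : Prop := ∀ (drills : Option (List String)), Dom_drill_labels_zh_py drills → Spec_drill_labels_zh_py drills (drill_labels_zh_py drills)

-- ===== LEMMAS AND PROOFS =====

-- A's loop, once one label f is collected, is B's search for the first differing label
theorem pv_loopA_one (rest : List String) (f : String) :
    pvLoopA rest [f] = pvFindSecond f rest := by
  induction rest with
  | nil => rfl
  | cons d r ih =>
    simp only [pvLoopA, pvFindSecond]
    by_cases h : pvMapping.getD d d = f
    · simp [h, ih]
    · simp [h, Ne.symm h]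

-- ===== VERDICT (by name: the statement is the Claim_ definition above) =====
theorem drill_labels_zh_py_spec : Claim_equal_drill_labels_zh_py := by
  intro drills _
  unfold Spec_drill_labels_zh_py drill_labels_zh_py drill_labels_zh_py_alt
  match drills with
  | none => rfl
  | some [] => rfl
  | some (d :: rest) =>
    simp only [pvLoopA, List.not_mem_nil, if_false, List.nil_append]
    exact pv_loopA_one rest (pvMapping.getD d d)
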